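-- pv_equiv track=rewrite | github.com/batuSenturk/NEAtetris | tetris_ai.py | calculate_covered_holes
-- ===== SOURCE A (Python) =====
-- def calculate_covered_holes(board_state):
--     """Count holes that have blocks above them"""
--     height = len(board_state)
--     width = len(board_state[0])
--     covered_holes = 0
--
--     for row in range(height):
--         for col in range(width):  # Check each column in the row
--             if board_state[row][col] == 0:  # If the cell is empty
--                 # Check if there are blocks above this empty cell
--                 for above_row in range(row):
--                     if board_state[above_row][col]:  # If there's a block above
--                         covered_holes += 1  # Count this as a covered hole
--                         break  # Stop checking above once we find a block
--
--     return covered_holes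
-- ===== SOURCE B (Python) =====
-- def calculate_covered_holes(board_state):
--     """Count holes that have blocks above them"""
--     width = len(board_state[0])
--     covered_holes = 0
--     for col in range(width):
--         seen_block = False
--         for row in board_state:
--             if row[col]:
--                 seen_block = True
--             elif seen_block:
--                 covered_holes += 1
--     return covered_holes
-- ===== Notes on version B (the rewrite author's own statement) =====
-- stated objective: alternative
-- what changed: Column-outer single top-down pass keeping one 'block seen above' flag per column, instead of rescanning all rows above every empty cell.
import Mathlib
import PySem

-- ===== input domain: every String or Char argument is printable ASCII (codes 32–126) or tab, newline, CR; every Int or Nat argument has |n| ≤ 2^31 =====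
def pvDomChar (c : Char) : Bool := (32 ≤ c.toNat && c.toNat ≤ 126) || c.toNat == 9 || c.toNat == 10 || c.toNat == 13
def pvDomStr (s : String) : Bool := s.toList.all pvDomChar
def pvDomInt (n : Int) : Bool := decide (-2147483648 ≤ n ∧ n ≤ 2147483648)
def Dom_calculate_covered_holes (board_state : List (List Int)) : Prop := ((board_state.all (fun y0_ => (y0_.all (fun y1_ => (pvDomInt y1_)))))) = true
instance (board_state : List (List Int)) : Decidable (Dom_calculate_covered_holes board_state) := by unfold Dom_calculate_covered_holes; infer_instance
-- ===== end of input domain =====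

-- B replaces A's per-cell rescan of the rows above by one top-down pass per column
-- that keeps a 'block seen above' flag (objective: alternative algorithm).

-- ===== PORT A =====
-- Literal port of A: row-major double loop; for each empty cell an inner scan of the
-- rows above it that stops at the first block (the break-ing for-loop is List.any).
-- Out-of-range accesses (excluded by Pre_) are patched total with getD.
def calculate_covered_holes (board_state : List (List Int)) : Int :=
  let height := board_state.length
  let width := (board_state.headD []).length
  (List.range height).foldl (fun acc row =>
    (List.range width).foldl (fun acc col =>
      if (board_state.getD row []).getD col 0 = 0 then
        if (List.range row).any (fun above_row =>
            (board_state.getD above_row []).getD col 0 != 0) then acc + 1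
        else acc
      else acc) acc) 0

-- ===== PORT B =====
-- Literal port of B: for each column, one fold over the rows with state
-- (seen_block, covered_holes).
def calculate_covered_holes_alt (board_state : List (List Int)) : Int :=
  let width := (board_state.headD []).length
  (List.range width).foldl (fun covered_holes col =>
    (board_state.foldl (fun (st : Bool × Int) row =>
        if row.getD col 0 != 0 then (true, st.2)
        else if st.1 then (st.1, st.2 + 1)
        else st)
      (false, covered_holes)).2) 0

-- ===== PRECONDITION & SPEC =====
-- Pre_ excludes exactly the inputs where the Python A raises IndexError: the empty
-- board (board_state[0]) and boards with a row shorter than the first row.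
def Pre_calculate_covered_holes (board_state : List (List Int)) : Prop :=
  board_state ≠ [] ∧
  ∀ r ∈ board_state, (board_state.headD []).length ≤ r.length
instance (board_state : List (List Int)) : Decidable (Pre_calculate_covered_holes board_state) := by
  unfold Pre_calculate_covered_holes; infer_instance
def pvWitness_calculate_covered_holes : List (List Int) := [[0, 1], [1, 0], [0, 0]]

def Spec_calculate_covered_holes (board_state : List (List Int)) (out : Int) : Prop := out = calculate_covered_holes_alt board_state
instance (board_state : List (List Int)) (out : Int) : Decidable (Spec_calculate_covered_holes board_state out) := by unfold Spec_calculate_covered_holes; infer_instance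

-- ===== CLAIM (what is proved, stated in full; the proofs are below) =====
def Claim_equal_calculate_covered_holes : Prop := ∀ (board_state : List (List Int)), Dom_calculate_covered_holes board_state → Pre_calculate_covered_holes board_state → Spec_calculate_covered_holes board_state (calculate_covered_holes board_state)

-- ===== LEMMAS AND PROOFS =====

-- per-cell 0/1 indicator both programs count: cell (i, col) is empty and some row above
-- has a block in column col
def cellInd (b : List (List Int)) (i : Nat) (col : Nat) (seen : Bool) : Int :=
  if (b.getD i []).getD col 0 = 0 ∧
     (seen = true ∨ ∃ j < i, (b.getD j []).getD col 0 ≠ 0) then 1 else 0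

-- structural per-column count matching B's fold
def colCount (col : Nat) : List (List Int) → Bool → Int
  | [], _ => 0
  | r :: rs, seen =>
      if r.getD col 0 ≠ 0 then colCount col rs true
      else (if seen then 1 else 0) + colCount col rs seen

lemma bfold_eq (col : Nat) (rs : List (List Int)) :
    ∀ (seen : Bool) (c : Int),
      (rs.foldl (fun (st : Bool × Int) row =>
        if row.getD col 0 != 0 then (true, st.2)
        else if st.1 then (st.1, st.2 + 1)
        else st) (seen, c)).2 = c + colCount col rs seen := by
  induction rs with
  | nil => intro seen c; simp [colCount]
  | cons r rs ih =>
      intro seen c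
      rw [List.foldl_cons]
      by_cases h : r[col]?.getD 0 = 0
      · have hb : (r.getD col 0 != 0) = false := by simp [List.getD_eq_getElem?_getD, h]
        have hne : ¬ r.getD col 0 ≠ 0 := by simp [List.getD_eq_getElem?_getD, h]
        cases seen with
        | false =>
            simp only [hb, Bool.false_eq_true, if_false]
            rw [ih]
            simp [colCount, h]
        | true =>
            simp only [hb, Bool.false_eq_true, if_false]
            rw [ih]
            simp [colCount, h]
            omega
      · have hb : (r.getD col 0 != 0) = true := by simp [List.getD_eq_getElem?_getD, h]
        simp only [hb]
        rw [ih]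
        simp [colCount, h]

lemma colsum_eq_colCount (col : Nat) :
    ∀ (rs : List (List Int)) (seen : Bool),
      ∑ i ∈ Finset.range rs.length, cellInd rs i col seen = colCount col rs seen := by
  intro rs
  induction rs with
  | nil => intro seen; simp [colCount]
  | cons r rs ih =>
      intro seen
      rw [List.length_cons, Finset.sum_range_succ']
      have hshift : ∀ i, cellInd (r :: rs) (i + 1) col seen
          = cellInd rs i col (seen || (r.getD col 0 != 0)) := by
        intro i
        simp only [cellInd, List.getD_cons_succ]
        congr 1
        rw [eq_iff_iff]
        constructor
        · rintro ⟨h0, h1⟩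
          refine ⟨h0, ?_⟩
          rcases h1 with h | ⟨j, hj, hne⟩
          · left; simp [h]
          · cases j with
            | zero =>
                simp only [List.getD_cons_zero] at hne
                have hne' : ¬ r[col]?.getD 0 = 0 := by
                  simpa [List.getD_eq_getElem?_getD] using hne
                simp [hne']
            | succ j =>
                right; exact ⟨j, by omega, by simpa using hne⟩
        · rintro ⟨h0, h1⟩
          refine ⟨h0, ?_⟩
          rcases h1 with h | ⟨j, hj, hne⟩
          · rcases Bool.or_eq_true_iff.mp h with h' | h'
            · left; exact h'
            · right; exact ⟨0, by omega, by simpa using h'⟩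
          · right; exact ⟨j + 1, by omega, by simpa using hne⟩
      have h0 : cellInd (r :: rs) 0 col seen
          = if r.getD col 0 = 0 then (if seen then 1 else 0) else 0 := by
        simp only [cellInd, List.getD_cons_zero]
        by_cases h : r[col]?.getD 0 = 0
        · simp [List.getD_eq_getElem?_getD, h]
        · simp [List.getD_eq_getElem?_getD, h]
      rw [Finset.sum_congr rfl (fun i _ => hshift i), ih, h0]
      by_cases h : r[col]?.getD 0 = 0
      · simp [colCount, List.getD_eq_getElem?_getD, h, add_comm]
      · have hb : (r[col]?.getD 0 != 0) = true := by simpa using h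
        simp [colCount, List.getD_eq_getElem?_getD, h, hb]

-- turning a foldl accumulation into a range sum
lemma foldl_add_sum (f : Nat → Int) : ∀ (n : Nat) (c : Int),
    (List.range n).foldl (fun acc i => acc + f i) c = c + ∑ i ∈ Finset.range n, f i := by
  intro n
  induction n with
  | zero => intro c; simp
  | succ n ih =>
      intro c
      rw [List.range_succ, List.foldl_append, ih]
      simp only [List.foldl_cons, List.foldl_nil, Finset.sum_range_succ]
      ring

-- A's per-cell contribution is the indicator cellInd
lemma aBody_eq (b : List (List Int)) (row col : Nat) (acc : Int) :
    (if (b.getD row []).getD col 0 = 0 then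
       if (List.range row).any (fun above_row =>
           (b.getD above_row []).getD col 0 != 0) then acc + 1
       else acc
     else acc) = acc + cellInd b row col false := by
  by_cases h : (b.getD row []).getD col 0 = 0
  · have h' : (b[row]?.getD [])[col]?.getD 0 = 0 := by
      simpa [List.getD_eq_getElem?_getD] using h
    by_cases ha : ((List.range row).any fun above_row =>
        (b.getD above_row []).getD col 0 != 0) = true
    · have hex : ∃ x < row, ¬ (b[x]?.getD [])[col]?.getD 0 = 0 := by
        simpa [List.any_eq_true, List.mem_range, List.getD_eq_getElem?_getD] using ha
      simp [cellInd, List.getD_eq_getElem?_getD, h', hex]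
    · have hex : ¬ ∃ x < row, ¬ (b[x]?.getD [])[col]?.getD 0 = 0 := by
        simpa [List.any_eq_true, List.mem_range, List.getD_eq_getElem?_getD] using ha
      simp [cellInd, List.getD_eq_getElem?_getD, h', hex]
  · have h' : ¬ (b[row]?.getD [])[col]?.getD 0 = 0 := by
      simpa [List.getD_eq_getElem?_getD] using h
    simp [cellInd, List.getD_eq_getElem?_getD, h']

-- A's fold as a double sum of indicators
lemma afold_eq (b : List (List Int)) :
    calculate_covered_holes b
      = ∑ row ∈ Finset.range b.length,
          ∑ col ∈ Finset.range (b.headD []).length, cellInd b row col false := by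
  unfold calculate_covered_holes
  have hinner : ∀ (row : Nat) (acc : Int),
      (List.range (b.headD []).length).foldl (fun acc col =>
        if (b.getD row []).getD col 0 = 0 then
          if (List.range row).any (fun above_row =>
              (b.getD above_row []).getD col 0 != 0) then acc + 1
          else acc
        else acc) acc
      = acc + ∑ col ∈ Finset.range (b.headD []).length, cellInd b row col false := by
    intro row acc
    rw [show (fun acc col =>
        if (b.getD row []).getD col 0 = 0 then
          if (List.range row).any (fun above_row =>
              (b.getD above_row []).getD col 0 != 0) then acc + 1
          else acc
        else acc) = fun acc col => acc + cellInd b row col false from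
      funext fun acc => funext fun col => aBody_eq b row col acc]
    exact foldl_add_sum _ _ _
  calc (List.range b.length).foldl (fun acc row =>
        (List.range (b.headD []).length).foldl (fun acc col =>
          if (b.getD row []).getD col 0 = 0 then
            if (List.range row).any (fun above_row =>
                (b.getD above_row []).getD col 0 != 0) then acc + 1
            else acc
          else acc) acc) 0
      = (List.range b.length).foldl (fun acc row =>
          acc + ∑ col ∈ Finset.range (b.headD []).length, cellInd b row col false) 0 := by
        exact List.foldl_ext _ _ 0 (fun acc row _ => hinner row acc)
    _ = _ := by rw [foldl_add_sum]; simp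

-- B's fold as the column-major double sum
lemma bsum (b : List (List Int)) :
    calculate_covered_holes_alt b
      = ∑ col ∈ Finset.range (b.headD []).length,
          ∑ row ∈ Finset.range b.length, cellInd b row col false := by
  unfold calculate_covered_holes_alt
  calc (List.range (b.headD []).length).foldl (fun covered_holes col =>
        (b.foldl (fun (st : Bool × Int) row =>
            if row.getD col 0 != 0 then (true, st.2)
            else if st.1 then (st.1, st.2 + 1)
            else st) (false, covered_holes)).2) 0
      = (List.range (b.headD []).length).foldl
          (fun covered_holes col => covered_holes + colCount col b false) 0 := by
        exact List.foldl_ext _ _ 0 (fun c col _ => bfold_eq col b false c)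
    _ = ∑ col ∈ Finset.range (b.headD []).length, colCount col b false := by
        rw [foldl_add_sum]; simp
    _ = _ := Finset.sum_congr rfl (fun col _ => (colsum_eq_colCount col b false).symm)

-- ===== VERDICT (by name: the statement is the Claim_ definition above) =====
theorem calculate_covered_holes_spec : Claim_equal_calculate_covered_holes := by
  intro b _ _
  unfold Spec_calculate_covered_holes
  rw [afold_eq, bsum, Finset.sum_comm]
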